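-- pv_equiv track=rewrite | github.com/kentnf/tune | tune/core/binding/resolver.py | _file_matches_types
-- ===== SOURCE A (Python) =====
-- _FASTQ_EXTS = {".fastq", ".fastq.gz", ".fq", ".fq.gz"}
--
-- _FASTA_EXTS = {".fa", ".fasta", ".fna"}
--
-- _GTF_EXTS = {".gtf", ".gff", ".gff3"}
--
-- def _file_matches_types(path: str, file_types: list[str]) -> bool:
--     """Return True if path's extension matches any of the given file_types."""
--     if not file_types or file_types == ["*"]:
--         return True
--     path_lower = path.lower()
--     for ft in file_types:
--         if ft == "*":
--             return True
--         # Handle compound extensions like "fastq.gz"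
--         if path_lower.endswith("." + ft.lstrip(".")):
--             return True
--         # Also check against logical categories
--         if ft in ("fastq",) and any(path_lower.endswith(e) for e in _FASTQ_EXTS):
--             return True
--         if ft == "bam" and path_lower.endswith(".bam"):
--             return True
--         if ft == "sam" and path_lower.endswith(".sam"):
--             return True
--         if ft in ("fa", "fasta", "fna") and any(path_lower.endswith(e) for e in _FASTA_EXTS):
--             return True
--         if ft in ("gtf", "gff") and any(path_lower.endswith(e) for e in _GTF_EXTS):
--             return True
--     return False
-- ===== SOURCE B (Python) =====
-- _FASTQ_EXTS = (".fastq", ".fastq.gz", ".fq", ".fq.gz")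
-- _FASTA_EXTS = (".fa", ".fasta", ".fna")
-- _GTF_EXTS = (".gtf", ".gff", ".gff3")
-- _CATEGORY_EXTS = {
--     "fastq": _FASTQ_EXTS,
--     "fa": _FASTA_EXTS, "fasta": _FASTA_EXTS, "fna": _FASTA_EXTS,
--     "gtf": _GTF_EXTS, "gff": _GTF_EXTS,
-- }
--
--
-- def _file_matches_types(path: str, file_types: list[str]) -> bool:
--     """Return True if path's extension matches any of the given file_types."""
--     if not file_types or "*" in file_types:
--         return True
--     suffixes = []
--     for ft in file_types:
--         suffixes.append("." + ft.lstrip("."))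
--         suffixes.extend(_CATEGORY_EXTS.get(ft, ()))
--     return path.lower().endswith(tuple(suffixes))
-- ===== Notes on version B (the rewrite author's own statement) =====
-- stated objective: idiomatic
-- what changed: B replaces A's per-element branch cascade with early returns by a single guard ('*' anywhere or empty list), one pass that builds a table of acceptable suffixes ('.'+ft.lstrip('.') plus category extensions from a dict), and one endswith over that table; the bam/sam special cases disappear into the generic suffix.
import Mathlib
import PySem

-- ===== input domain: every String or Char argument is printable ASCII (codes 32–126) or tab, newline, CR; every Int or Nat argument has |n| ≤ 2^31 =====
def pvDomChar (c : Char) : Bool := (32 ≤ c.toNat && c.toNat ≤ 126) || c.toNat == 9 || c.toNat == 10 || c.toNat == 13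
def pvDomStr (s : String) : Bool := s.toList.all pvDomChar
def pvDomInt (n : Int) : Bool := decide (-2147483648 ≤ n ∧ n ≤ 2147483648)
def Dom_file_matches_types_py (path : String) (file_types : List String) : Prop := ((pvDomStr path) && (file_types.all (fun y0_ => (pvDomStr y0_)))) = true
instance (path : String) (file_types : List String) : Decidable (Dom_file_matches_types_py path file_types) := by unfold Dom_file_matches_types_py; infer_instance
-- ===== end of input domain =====

-- B replaces A's per-element branch cascade (early returns per file type) by a single '*'/empty
-- guard, one pass building a table of acceptable suffixes, and one endswith over that table (idiomatic).

-- ===== PORT A =====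
-- ft.lstrip(".") : drop leading '.' characters (exact for a one-char strip set)
def pvLstripDot (cs : List Char) : List Char := cs.dropWhile (· == '.')

def pvFastqExts : List (List Char) := [".fastq".toList, ".fastq.gz".toList, ".fq".toList, ".fq.gz".toList]
def pvFastaExts : List (List Char) := [".fa".toList, ".fasta".toList, ".fna".toList]
def pvGtfExts : List (List Char) := [".gtf".toList, ".gff".toList, ".gff3".toList]

-- the for-loop with its early returns, branch by branch in A's order
def pvLoopA (pl : List Char) : List String → Bool
  | [] => false
  | ft :: rest =>
    if ft = "*" then true
    else if PySem.Chars.endswith pl ('.' :: pvLstripDot ft.toList) then true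
    else if ft = "fastq" ∧ pvFastqExts.any (fun e => PySem.Chars.endswith pl e) then true
    else if ft = "bam" ∧ PySem.Chars.endswith pl ".bam".toList then true
    else if ft = "sam" ∧ PySem.Chars.endswith pl ".sam".toList then true
    else if (ft = "fa" ∨ ft = "fasta" ∨ ft = "fna") ∧ pvFastaExts.any (fun e => PySem.Chars.endswith pl e) then true
    else if (ft = "gtf" ∨ ft = "gff") ∧ pvGtfExts.any (fun e => PySem.Chars.endswith pl e) then true
    else pvLoopA pl rest

def file_matches_types_py (path : String) (file_types : List String) : Bool :=
  if file_types = [] ∨ file_types = ["*"] then true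
  else
    let path_lower := PySem.Chars.lower path.toList
    pvLoopA path_lower file_types

-- ===== PORT B =====
-- _CATEGORY_EXTS.get(ft, ()) : literal dict lookup, ported as a case split on the key
def pvCatExts (ft : String) : List (List Char) :=
  if ft = "fastq" then pvFastqExts
  else if ft = "fa" ∨ ft = "fasta" ∨ ft = "fna" then pvFastaExts
  else if ft = "gtf" ∨ ft = "gff" then pvGtfExts
  else []

def file_matches_types_py_alt (path : String) (file_types : List String) : Bool :=
  if file_types = [] ∨ "*" ∈ file_types then true
  else
    let suffixes := file_types.foldl
      (fun acc ft => acc ++ (('.' :: pvLstripDot ft.toList) :: pvCatExts ft)) []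
    suffixes.any (fun suf => PySem.Chars.endswith (PySem.Chars.lower path.toList) suf)

-- ===== PRECONDITION & SPEC =====
def Spec_file_matches_types_py (path : String) (file_types : List String) (out : Bool) : Prop := out = file_matches_types_py_alt path file_types
instance (path : String) (file_types : List String) (out : Bool) : Decidable (Spec_file_matches_types_py path file_types out) := by unfold Spec_file_matches_types_py; infer_instance

-- ===== CLAIM (what is proved, stated in full; the proofs are below) =====
def Claim_equal_file_matches_types_py : Prop := ∀ (path : String) (file_types : List String), Dom_file_matches_types_py path file_types → Spec_file_matches_types_py path file_types (file_matches_types_py path file_types)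

-- ===== LEMMAS AND PROOFS =====

-- any over B's foldl-built suffix table distributes over the per-ft suffix groups
theorem pv_any_fold (p : List Char → Bool) (sufs : String → List (List Char)) :
    ∀ (fts : List String) (acc : List (List Char)),
      ((fts.foldl (fun a ft => a ++ sufs ft) acc).any p)
        = (acc.any p || fts.any (fun ft => (sufs ft).any p)) := by
  intro fts
  induction fts with
  | nil => intro acc; simp
  | cons ft rest ih =>
    intro acc
    simp only [List.foldl_cons, ih, List.any_append, List.any_cons, Bool.or_assoc]

-- A's loop returns true as soon as it can see a "*"
theorem pvLoopA_star (pl : List Char) : ∀ fts, "*" ∈ fts → pvLoopA pl fts = true := by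
  intro fts h
  induction fts with
  | nil => cases h
  | cons ft rest ih =>
    by_cases hft : ft = "*"
    · simp [pvLoopA, hft]
    · have hr : "*" ∈ rest := by
        rcases List.mem_cons.mp h with h' | h'
        · exact absurd h'.symm hft
        · exact h'
      simp only [pvLoopA]
      rw [if_neg hft]
      split_ifs <;> first | rfl | exact ih hr

-- one iteration of A's branch cascade equals B's suffix group for that ft
theorem pv_elem (pl : List Char) (ft : String) (rest : List String) (hft : ¬ ft = "*") :
    pvLoopA pl (ft :: rest) =
      (((('.' :: pvLstripDot ft.toList) :: pvCatExts ft).any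
          (fun s => PySem.Chars.endswith pl s)) || pvLoopA pl rest) := by
  simp only [pvLoopA]
  rw [if_neg hft]
  by_cases h1 : ft = "fastq"
  · subst h1
    simp [pvCatExts, pvLstripDot, pvFastqExts, Bool.or_assoc]
  by_cases h2 : ft = "bam"
  · subst h2
    simp [pvCatExts, pvLstripDot]
  by_cases h3 : ft = "sam"
  · subst h3
    simp [pvCatExts, pvLstripDot]
  by_cases h4 : ft = "fa"
  · subst h4
    simp [pvCatExts, pvLstripDot, pvFastaExts, Bool.or_assoc]
  by_cases h5 : ft = "fasta"
  · subst h5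
    simp [pvCatExts, pvLstripDot, pvFastaExts, Bool.or_assoc]
  by_cases h6 : ft = "fna"
  · subst h6
    simp [pvCatExts, pvLstripDot, pvFastaExts, Bool.or_assoc]
  by_cases h7 : ft = "gtf"
  · subst h7
    simp [pvCatExts, pvLstripDot, pvGtfExts, Bool.or_assoc]
  by_cases h8 : ft = "gff"
  · subst h8
    simp [pvCatExts, pvLstripDot, pvGtfExts, Bool.or_assoc]
  · simp [pvCatExts, h1, h2, h3, h4, h5, h6, h7, h8]

-- A's loop equals B's flat any, when no "*" occurs
theorem pvLoopA_eq (pl : List Char) : ∀ fts, "*" ∉ fts →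
    pvLoopA pl fts = fts.any
      (fun ft => (('.' :: pvLstripDot ft.toList) :: pvCatExts ft).any
        (fun s => PySem.Chars.endswith pl s)) := by
  intro fts h
  induction fts with
  | nil => rfl
  | cons ft rest ih =>
    have hft : ¬ ft = "*" := fun hh => h (by simp [hh])
    rw [pv_elem pl ft rest hft, ih (fun hr => h (List.mem_cons_of_mem _ hr))]
    simp [List.any_cons]

-- ===== VERDICT (by name: the statement is the Claim_ definition above) =====
theorem file_matches_types_py_spec : Claim_equal_file_matches_types_py := by
  intro path fts _
  unfold Spec_file_matches_types_py
  simp only [file_matches_types_py, file_matches_types_py_alt]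
  by_cases hnil : fts = []
  · simp [hnil]
  · by_cases hstar : "*" ∈ fts
    · rw [if_pos (Or.inr hstar)]
      by_cases hone : fts = ["*"]
      · rw [if_pos (Or.inr hone)]
      · rw [if_neg (by rintro (h | h); exact hnil h; exact hone h)]
        exact pvLoopA_star _ fts hstar
    · rw [if_neg (by rintro (h | h); exact hnil h; exact hstar (by simp [h]))]
      rw [if_neg (by rintro (h | h); exact hnil h; exact hstar h)]
      rw [pv_any_fold]
      simp only [List.any_nil, Bool.false_or]
      exact pvLoopA_eq _ fts hstar
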